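-- pv_equiv track=rewrite | github.com/rodolfomac3/Reference-Genome | app.py | _dinuc_ok
-- ===== SOURCE A (Python) =====
-- def _dinuc_ok(seq: str, max_repeats: int) -> bool:
--     if len(seq) < 4:
--         return True
--     for i in range(len(seq)-3):
--         di = seq[i:i+2]
--         reps = 1
--         j = i+2
--         while j+2 <= len(seq) and seq[j:j+2] == di:
--             reps += 1
--             j += 2
--         if reps > max_repeats:
--             return False
--     return True
-- ===== SOURCE B (Python) =====
-- def _dinuc_ok(seq: str, max_repeats: int) -> bool:
--     n = len(seq)
--     if n < 4:
--         return True
--     # run[i] = number of consecutive copies of seq[i:i+2] starting at i (step 2)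
--     run = [1] * (n - 1)
--     for i in range(n - 4, -1, -1):
--         if seq[i] == seq[i + 2] and seq[i + 1] == seq[i + 3]:
--             run[i] = run[i + 2] + 1
--     return all(run[i] <= max_repeats for i in range(n - 3))
-- ===== Notes on version B (the rewrite author's own statement) =====
-- stated objective: faster
-- what changed: Replaces the nested scan (for each start index, re-walk the whole repeat run) by a single backward DP pass that computes every period-2 run length in O(1) each, then checks them all.
import Mathlib
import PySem

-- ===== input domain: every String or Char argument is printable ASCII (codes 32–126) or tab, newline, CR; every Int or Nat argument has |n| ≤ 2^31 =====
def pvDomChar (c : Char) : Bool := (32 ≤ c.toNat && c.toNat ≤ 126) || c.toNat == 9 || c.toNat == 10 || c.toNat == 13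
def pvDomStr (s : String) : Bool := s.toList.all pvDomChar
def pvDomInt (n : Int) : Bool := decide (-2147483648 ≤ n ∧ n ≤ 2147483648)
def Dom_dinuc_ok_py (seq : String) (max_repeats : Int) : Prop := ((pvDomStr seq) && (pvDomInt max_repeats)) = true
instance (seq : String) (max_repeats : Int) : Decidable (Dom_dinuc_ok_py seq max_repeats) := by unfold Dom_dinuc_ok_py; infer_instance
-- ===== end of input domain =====

-- B replaces A's nested re-scan of each repeat run by one backward DP pass over run lengths (objective: faster, asymptotic).

-- ===== PORT A =====
-- seq[i:i+2] with 0 ≤ i : exact as take/drop (Python slices clamp at the end, so does take)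
def pvSlice2 (s : List Char) (i : Nat) : List Char := (s.drop i).take 2

-- the inner 'while j+2 <= len(seq) and seq[j:j+2] == di' loop; fuel ≥ number of iterations
def pvWhileA (s : List Char) (di : List Char) : Nat → Nat → Nat → Nat
  | 0, _, reps => reps
  | fuel+1, j, reps =>
    if j + 2 ≤ s.length ∧ pvSlice2 s j = di then
      pvWhileA s di fuel (j+2) (reps+1)
    else reps

-- the 'for i in range(len(seq)-3)' loop with early return False
def pvLoopA (s : List Char) (max_repeats : Int) : Nat → Nat → Bool
  | 0, _ => true
  | fuel+1, i =>
    let di := pvSlice2 s i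
    let reps := pvWhileA s di s.length (i+2) 1
    if (reps : Int) > max_repeats then false
    else pvLoopA s max_repeats fuel (i+1)

def dinuc_ok_py (seq : String) (max_repeats : Int) : Bool :=
  let s := seq.toList
  if s.length < 4 then true
  else pvLoopA s max_repeats (s.length - 3) 0

-- ===== PORT B =====
-- Source B's backward loop building run[i] for i = n-2 .. 0; returned list holds run[i..n-2]
def pvRunsB (s : List Char) : Nat → Nat → List Nat
  | 0, _ => []
  | fuel+1, i =>
    let rest := pvRunsB s fuel (i+1)
    let v := if i + 4 ≤ s.length ∧ s.getD i ' ' = s.getD (i+2) ' ' ∧ s.getD (i+1) ' ' = s.getD (i+3) ' '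
             then rest.getD 1 1 + 1 else 1
    v :: rest

def dinuc_ok_py_alt (seq : String) (max_repeats : Int) : Bool :=
  let s := seq.toList
  let n := s.length
  if n < 4 then true
  else
    let runs := pvRunsB s (n - 1) 0
    (List.range (n - 3)).all (fun k => ((runs.getD k 1 : Nat) : Int) ≤ max_repeats)

-- ===== PRECONDITION & SPEC =====
def Spec_dinuc_ok_py (seq : String) (max_repeats : Int) (out : Bool) : Prop := out = dinuc_ok_py_alt seq max_repeats
instance (seq : String) (max_repeats : Int) (out : Bool) : Decidable (Spec_dinuc_ok_py seq max_repeats out) := by unfold Spec_dinuc_ok_py; infer_instance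

-- ===== CLAIM (what is proved, stated in full; the proofs are below) =====
def Claim_equal_dinuc_ok_py : Prop := ∀ (seq : String) (max_repeats : Int), Dom_dinuc_ok_py seq max_repeats → Spec_dinuc_ok_py seq max_repeats (dinuc_ok_py seq max_repeats)

-- ===== LEMMAS AND PROOFS =====

-- ghost: run length of seq[i:i+2] repeats starting at i (fuel-robust reference function)
def ghostR (s : List Char) : Nat → Nat → Nat
  | 0, _ => 1
  | fuel+1, i =>
    if i + 4 ≤ s.length ∧ s.getD i ' ' = s.getD (i+2) ' ' ∧ s.getD (i+1) ' ' = s.getD (i+3) ' '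
    then ghostR s fuel (i+2) + 1 else 1

theorem ghostR_congr (s : List Char) : ∀ (f1 : Nat) (i f2 : Nat),
    s.length ≤ i + 2*f1 + 3 → s.length ≤ i + 2*f2 + 3 → ghostR s f1 i = ghostR s f2 i := by
  intro f1
  induction f1 with
  | zero =>
    intro i f2 h1 _
    cases f2 with
    | zero => rfl
    | succ f2 =>
      simp only [ghostR]
      rw [if_neg]
      rintro ⟨h4, -⟩; omega
  | succ f1 ih =>
    intro i f2 h1 h2
    cases f2 with
    | zero =>
      simp only [ghostR]
      rw [if_neg]
      rintro ⟨h4, -⟩; omega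
    | succ f2 =>
      simp only [ghostR]
      by_cases hc : i + 4 ≤ s.length ∧ s.getD i ' ' = s.getD (i+2) ' ' ∧ s.getD (i+1) ' ' = s.getD (i+3) ' '
      · rw [if_pos hc, if_pos hc, ih (i+2) f2 (by omega) (by omega)]
      · rw [if_neg hc, if_neg hc]

theorem slice2_eq (s : List Char) (i : Nat) (h : i + 2 ≤ s.length) :
    pvSlice2 s i = [s.getD i ' ', s.getD (i+1) ' '] := by
  have h1 : i < s.length := by omega
  have h2 : i + 1 < s.length := by omega
  unfold pvSlice2
  rw [List.getD_eq_getElem _ _ h1, List.getD_eq_getElem _ _ h2,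
      List.drop_eq_getElem_cons h1, List.drop_eq_getElem_cons h2]
  rfl

theorem while_ghost (s : List Char) : ∀ (f i acc : Nat), 1 ≤ acc →
    pvWhileA s (pvSlice2 s i) f (i+2) acc = acc - 1 + ghostR s f i := by
  intro f
  induction f with
  | zero => intro i acc hacc; simp only [pvWhileA, ghostR]; omega
  | succ f ih =>
    intro i acc hacc
    simp only [pvWhileA, ghostR]
    by_cases hc : i + 4 ≤ s.length ∧ s.getD i ' ' = s.getD (i+2) ' ' ∧ s.getD (i+1) ' ' = s.getD (i+3) ' '
    · obtain ⟨hlen, he1, he2⟩ := hc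
      have hsl : pvSlice2 s (i+2) = pvSlice2 s i := by
        rw [slice2_eq s i (by omega), slice2_eq s (i+2) (by omega)]
        rw [he1, he2, show i+2+1 = i+3 from rfl]
      rw [if_pos ⟨by omega, by rw [hsl]⟩, if_pos ⟨hlen, he1, he2⟩]
      have hthis := ih (i+2) (acc+1) (by omega)
      rw [hsl] at hthis
      rw [hthis]
      omega
    · rw [if_neg, if_neg hc]
      · omega
      · rintro ⟨hj, hsl⟩
        have hlen : i + 4 ≤ s.length := by omega
        have h1 := slice2_eq s i (by omega)
        have h2 := slice2_eq s (i+2) (by omega)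
        rw [h1, h2] at hsl
        simp only [List.cons.injEq, and_true] at hsl
        exact hc ⟨hlen, hsl.1.symm, by rw [show i+3 = i+2+1 from rfl]; exact hsl.2.symm⟩

theorem runs_getD (s : List Char) : ∀ (f i k : Nat), k < f → f + i = s.length - 1 →
    (pvRunsB s f i).getD k 1 = ghostR s s.length (i + k) := by
  intro f
  induction f with
  | zero => intro i k hk _; omega
  | succ f ih =>
    intro i k hk hfi
    cases k with
    | zero =>
      have hexp : ghostR s s.length (i + 0) = ghostR s (f+i+1+1) i := by
        simp only [Nat.add_zero]
        apply ghostR_congr <;> omega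
      simp only [pvRunsB, List.getD_cons_zero]
      by_cases hc : i + 4 ≤ s.length ∧ s.getD i ' ' = s.getD (i+2) ' ' ∧ s.getD (i+1) ' ' = s.getD (i+3) ' '
      · rw [if_pos hc]
        have h1f : 1 < f := by omega
        rw [ih (i+1) 1 h1f (by omega), hexp]
        have hR : ghostR s (f+i+1+1) i = ghostR s (f+i+1) (i+2) + 1 := by
          simp only [ghostR]
          rw [if_pos hc]
        rw [hR]
        have : ghostR s (f+i+1) (i+2) = ghostR s s.length (i+1+1) := by
          apply ghostR_congr <;> omega
        rw [this]
      · rw [if_neg hc, hexp]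
        have hR : ghostR s (f+i+1+1) i = 1 := by
          simp only [ghostR]
          rw [if_neg hc]
        rw [hR]
    | succ k =>
      simp only [pvRunsB, List.getD_cons_succ]
      rw [ih (i+1) k (by omega) (by omega)]
      congr 1; omega

theorem all_congr_mem {α : Type} (l : List α) (f g : α → Bool)
    (h : ∀ x ∈ l, f x = g x) : l.all f = l.all g := by
  induction l with
  | nil => rfl
  | cons a l ih =>
    simp only [List.all_cons]
    rw [h a (by simp), ih (fun x hx => h x (by simp [hx]))]

theorem loopA_all (s : List Char) (max_repeats : Int) : ∀ (fuel i : Nat),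
    pvLoopA s max_repeats fuel i
      = (List.range fuel).all (fun t => decide ((ghostR s s.length (i + t) : Int) ≤ max_repeats)) := by
  intro fuel
  induction fuel with
  | zero => intro i; rfl
  | succ fuel ih =>
    intro i
    simp only [pvLoopA]
    have hreps : pvWhileA s (pvSlice2 s i) s.length (i+2) 1 = ghostR s s.length i := by
      have := while_ghost s s.length i 1 le_rfl
      omega
    rw [hreps]
    by_cases h : (ghostR s s.length i : Int) > max_repeats
    · rw [if_pos h]
      symm
      simp only [List.range_succ_eq_map, List.all_cons, List.all_map, Nat.add_zero]
      have hd : decide ((ghostR s s.length i : Int) ≤ max_repeats) = false := by simpa using h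
      rw [hd, Bool.false_and]
    · rw [if_neg h, ih (i+1)]
      simp only [List.range_succ_eq_map, List.all_cons, List.all_map, Nat.add_zero]
      have h0 : decide ((ghostR s s.length i : Int) ≤ max_repeats) = true := by
        simpa using not_lt.mp h
      rw [h0, Bool.true_and]
      apply all_congr_mem
      intro t _
      simp only [Function.comp_apply]
      rw [show i + (t + 1) = i + 1 + t by omega]

-- ===== VERDICT (by name: the statement is the Claim_ definition above) =====
theorem dinuc_ok_py_spec : Claim_equal_dinuc_ok_py := by
  intro seq max_repeats _
  unfold Spec_dinuc_ok_py dinuc_ok_py dinuc_ok_py_alt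
  set s := seq.toList with hs
  by_cases hlen : s.length < 4
  · simp [hlen]
  · simp only [if_neg hlen]
    rw [loopA_all]
    apply all_congr_mem
    intro k hk
    have hk3 : k < s.length - 3 := List.mem_range.mp hk
    rw [runs_getD s (s.length - 1) 0 k (by omega) (by omega)]
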